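-- pv_equiv track=rewrite | github.com/callistopan/My-leetcode-solutions | 3152-special-array-ii/3152-special-array-ii.py | isArraySpecial
-- ===== SOURCE A (Python) =====
-- from typing import List
--
-- def isArraySpecial(nums: List[int], queries: List[List[int]]) -> List[bool]:
--     n = len(nums)
--     if n < 2:
--         return [True] * len(queries)
--
--     parity_diff = [0] * n
--     for i in range(1, n):
--         parity_diff[i] = (nums[i] % 2) != (nums[i - 1] % 2)
--
--     prefix_sum = [0] * n
--     for i in range(1, n):
--         prefix_sum[i] = prefix_sum[i - 1] + parity_diff[i]
--
--     result = []
--     for fromi, toi in queries: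
--         if fromi == toi:
--             result.append(True)
--         else:
--             total_diff_parity = prefix_sum[toi] - prefix_sum[fromi]
--             is_special = (total_diff_parity == (toi - fromi))
--             result.append(is_special)
--
--     return result
-- ===== SOURCE B (Python) =====
-- from typing import List
--
-- def isArraySpecial(nums: List[int], queries: List[List[int]]) -> List[bool]:
--     if len(nums) < 2:
--         return [True] * len(queries)
--     # start[i] = left endpoint of the maximal alternating run ending at i
--     start = [0] * len(nums)
--     for i in range(1, len(nums)):
--         start[i] = start[i - 1] if nums[i] % 2 != nums[i - 1] % 2 else i
--     return [start[toi] <= fromi for fromi, toi in queries]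
-- ===== Notes on version B (the rewrite author's own statement) =====
-- stated objective: simpler
-- what changed: Replaces the parity-diff array plus prefix-sum array and the prefix-difference arithmetic (with a special f==t branch) by a single run-start array start[i] = left end of the maximal alternating run ending at i, so each query is answered by the single comparison start[toi] <= fromi with no branch.
-- outside the precondition, e.g. on isArraySpecial([1, 2, 4], [[2, 0]]): A returns [False], B returns [True]; on isArraySpecial([1, 2], [[-2, -1]]): A returns [True], B returns [False]; on isArraySpecial([1, 2], [[0, 5]]): A raises IndexError, B raises IndexError
import Mathlib
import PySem

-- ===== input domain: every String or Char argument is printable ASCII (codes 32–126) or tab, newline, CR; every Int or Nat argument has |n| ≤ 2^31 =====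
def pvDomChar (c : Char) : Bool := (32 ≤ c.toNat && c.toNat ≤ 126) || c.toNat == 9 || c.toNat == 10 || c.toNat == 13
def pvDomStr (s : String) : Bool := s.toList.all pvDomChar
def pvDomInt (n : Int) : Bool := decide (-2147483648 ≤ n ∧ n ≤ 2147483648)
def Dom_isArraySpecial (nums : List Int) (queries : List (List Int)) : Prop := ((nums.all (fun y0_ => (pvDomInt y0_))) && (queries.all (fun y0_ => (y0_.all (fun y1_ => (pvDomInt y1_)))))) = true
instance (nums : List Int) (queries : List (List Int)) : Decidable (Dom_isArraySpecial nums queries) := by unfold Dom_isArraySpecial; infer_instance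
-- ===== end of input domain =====

-- B replaces A's parity-diff + prefix-sum arrays and the prefix-difference test (with its f==t branch)
-- by one run-start array answered with a single comparison per query (objective: simpler, same cost).

-- ===== PORT A =====
def isArraySpecial (nums : List Int) (queries : List (List Int)) : List Bool :=
  let n : Int := nums.length
  if n < 2 then List.replicate queries.length true
  else
    let parity_diff : List Int :=
      (PySem.List.pyRange 1 n 1).foldl (fun pd i =>
        pd.set i.toNat (if PySem.Int.mod (PySem.List.pyGetD nums i 0) 2
                          ≠ PySem.Int.mod (PySem.List.pyGetD nums (i-1) 0) 2 then 1 else 0))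
        (List.replicate nums.length 0)
    let prefix_sum : List Int :=
      (PySem.List.pyRange 1 n 1).foldl (fun ps i =>
        ps.set i.toNat (PySem.List.pyGetD ps (i-1) 0 + PySem.List.pyGetD parity_diff i 0))
        (List.replicate nums.length 0)
    queries.foldl (fun result q =>
      match q with
      | [fromi, toi] =>
        if fromi = toi then result ++ [true]
        else result ++ [decide (PySem.List.pyGetD prefix_sum toi 0 - PySem.List.pyGetD prefix_sum fromi 0 = toi - fromi)]
      | _ => result) []   -- Python raises ValueError here (query not a pair); excluded by Pre_

-- ===== PORT B =====
def isArraySpecial_alt (nums : List Int) (queries : List (List Int)) : List Bool :=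
  if nums.length < 2 then List.replicate queries.length true
  else
    let start : List Int :=
      (PySem.List.pyRange 1 (nums.length : Int) 1).foldl (fun st i =>
        st.set i.toNat (if PySem.Int.mod (PySem.List.pyGetD nums i 0) 2
                          ≠ PySem.Int.mod (PySem.List.pyGetD nums (i-1) 0) 2
                        then PySem.List.pyGetD st (i-1) 0 else i))
        (List.replicate nums.length 0)
    queries.map (fun q =>
      match q with
      | [] => true          -- Python raises ValueError here; excluded by Pre_
      | [_] => true         -- Python raises ValueError here; excluded by Pre_
      | fromi :: toi :: _ => decide (PySem.List.pyGetD start toi 0 ≤ fromi))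

-- ===== PRECONDITION & SPEC =====
-- Pre_ excludes queries on which A raises when len(nums) ≥ 2 (wrong length → ValueError, index ≥ n
-- or < -n → IndexError) and, as a defensible corner outside the problem's contract 0 ≤ from ≤ to < n,
-- queries with negative or reversed endpoints, where A's value is an accident of Python's
-- negative-index wraparound and of comparing a prefix difference against toi - fromi.
def Pre_isArraySpecial (nums : List Int) (queries : List (List Int)) : Prop :=
  (nums.length : Int) < 2 ∨
    ∀ q ∈ queries, q.length = 2 ∧ 0 ≤ q.headD 0 ∧ q.headD 0 ≤ q.getLastD 0 ∧
      q.getLastD 0 < (nums.length : Int)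
instance (nums : List Int) (queries : List (List Int)) : Decidable (Pre_isArraySpecial nums queries) := by
  unfold Pre_isArraySpecial; infer_instance

def pvWitness_isArraySpecial : List Int × List (List Int) := ([1, 2, 3], [[0, 1], [1, 1], [0, 2]])

def Spec_isArraySpecial (nums : List Int) (queries : List (List Int)) (out : List Bool) : Prop := out = isArraySpecial_alt nums queries
instance (nums : List Int) (queries : List (List Int)) (out : List Bool) : Decidable (Spec_isArraySpecial nums queries out) := by unfold Spec_isArraySpecial; infer_instance

-- ===== CLAIM (what is proved, stated in full; the proofs are below) =====
def Claim_equal_isArraySpecial : Prop := ∀ (nums : List Int) (queries : List (List Int)), Dom_isArraySpecial nums queries → Pre_isArraySpecial nums queries → Spec_isArraySpecial nums queries (isArraySpecial nums queries)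

-- ===== LEMMAS AND PROOFS =====

-- d nums j: 1 if nums[j] and nums[j-1] have different parity, else 0 (for 1 ≤ j < n)
def pvD (nums : List Int) (j : Nat) : Int :=
  if PySem.Int.mod (PySem.List.pyGetD nums (j : Int) 0) 2
       ≠ PySem.Int.mod (PySem.List.pyGetD nums ((j : Int) - 1) 0) 2 then 1 else 0

-- P nums j = prefix_sum[j]
def pvP (nums : List Int) : Nat → Int
  | 0 => 0
  | j + 1 => pvP nums j + pvD nums (j + 1)

-- S nums j = start[j]
def pvS (nums : List Int) : Nat → Int
  | 0 => 0
  | j + 1 => if pvD nums (j + 1) = 1 then pvS nums j else (j : Int) + 1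

lemma pvD_cases (nums : List Int) (j : Nat) : pvD nums j = 0 ∨ pvD nums j = 1 := by
  unfold pvD; split_ifs <;> simp

-- left-to-right fill loop whose step i writes a value independent of the accumulator
lemma fill_loop_indep (g : Int → Int) (len m : Nat) (hm : m ≤ len) :
    (PySem.List.pyRange 1 (m : Int) 1).foldl
      (fun a i => a.set i.toNat (g i))
      (List.replicate len 0)
    = (List.range len).map (fun j => if 1 ≤ j ∧ j < m then g (j : Int) else 0) := by
  induction m with
  | zero =>
      rw [PySem.List.pyRange_one_eq_nil (by norm_num)]
      simp only [List.foldl_nil]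
      apply List.ext_getElem
      · simp
      · intro i h1 h2
        rw [List.getElem_replicate, List.getElem_map, List.getElem_range, if_neg (by omega)]
  | succ m ih =>
      rcases Nat.eq_zero_or_pos m with hm0 | hm0
      · subst hm0
        rw [show ((1 : Nat) : Int) = 1 by norm_num, PySem.List.pyRange_one_eq_nil le_rfl]
        simp only [List.foldl_nil]
        apply List.ext_getElem
        · simp
        · intro i h1 h2
          rw [List.getElem_replicate, List.getElem_map, List.getElem_range, if_neg (by omega)]
      · have hmle : m ≤ len := by omega
        rw [show ((m + 1 : Nat) : Int) = (m : Int) + 1 by push_cast; ring,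
            PySem.List.pyRange_one_succ_right (by exact_mod_cast hm0), List.foldl_append,
            ih hmle]
        simp only [List.foldl_cons, List.foldl_nil]
        apply List.ext_getElem
        · simp
        · intro i h1 h2
          simp only [List.length_map, List.length_range] at h2
          rw [List.getElem_set]
          simp only [List.getElem_map, List.getElem_range, Int.toNat_natCast]
          split_ifs with he hc1 hc2 <;> first | rfl | exact (by omega : False).elim | (rw [he])

-- left-to-right fill loop whose step i writes F i at index i, reading only index i-1
-- of the accumulator (which then holds F (i-1))
lemma fill_loop (F : Nat → Int) (h : Int → Int → Int) (len m : Nat) (hm : m ≤ len)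
    (hF0 : F 0 = 0) (hF : ∀ k : Nat, k + 1 < m → F (k + 1) = h ((k : Int) + 1) (F k)) :
    (PySem.List.pyRange 1 (m : Int) 1).foldl
      (fun a i => a.set i.toNat (h i (PySem.List.pyGetD a (i - 1) 0)))
      (List.replicate len 0)
    = (List.range len).map (fun j => if 1 ≤ j ∧ j < m then F j else 0) := by
  induction m with
  | zero =>
      rw [PySem.List.pyRange_one_eq_nil (by norm_num)]
      simp only [List.foldl_nil]
      apply List.ext_getElem
      · simp
      · intro i h1 h2
        rw [List.getElem_replicate, List.getElem_map, List.getElem_range, if_neg (by omega)]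
  | succ m ih =>
      rcases Nat.eq_zero_or_pos m with hm0 | hm0
      · subst hm0
        rw [show ((1 : Nat) : Int) = 1 by norm_num, PySem.List.pyRange_one_eq_nil le_rfl]
        simp only [List.foldl_nil]
        apply List.ext_getElem
        · simp
        · intro i h1 h2
          rw [List.getElem_replicate, List.getElem_map, List.getElem_range, if_neg (by omega)]
      · have hmle : m ≤ len := by omega
        rw [show ((m + 1 : Nat) : Int) = (m : Int) + 1 by push_cast; ring,
            PySem.List.pyRange_one_succ_right (by exact_mod_cast hm0), List.foldl_append,
            ih hmle (fun k hk => hF k (by omega))]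
        simp only [List.foldl_cons, List.foldl_nil]
        have hread : PySem.List.pyGetD
            ((List.range len).map (fun j => if 1 ≤ j ∧ j < m then F j else 0)) ((m : Int) - 1) 0
            = F (m - 1) := by
          rw [PySem.List.pyGetD_eq_getElem _ _ (by omega) (by simp; omega)]
          have ht : ((m : Int) - 1).toNat = m - 1 := by omega
          simp only [List.getElem_map, List.getElem_range, ht]
          split_ifs with hc
          · rfl
          · have h0 : m - 1 = 0 := by omega
            rw [h0, hF0]
        have hFm : h (m : Int) (F (m - 1)) = F m := by
          have := (hF (m - 1) (by omega)).symm
          rwa [Nat.sub_add_cancel hm0, show ((m - 1 : Nat) : Int) + 1 = (m : Int) by omega] at this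
        rw [hread, hFm]
        apply List.ext_getElem
        · simp
        · intro i h1 h2
          simp only [List.length_map, List.length_range] at h2
          rw [List.getElem_set]
          simp only [List.getElem_map, List.getElem_range, Int.toNat_natCast]
          split_ifs with he hc1 hc2 <;> first | rfl | exact (by omega : False).elim | (rw [he])

-- reading a filled array at an in-range Int index (1 ≤ t, or G 0 = 0 absorbs the j = 0 cell)
lemma pyGetD_filled (G : Nat → Int) (len : Nat) (t : Int)
    (h0 : 0 ≤ t) (hlt : t < (len : Int)) (hG : 1 ≤ t ∨ G 0 = 0) :
    PySem.List.pyGetD ((List.range len).map (fun j => if 1 ≤ j ∧ j < len then G j else 0)) t 0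
    = G t.toNat := by
  rw [PySem.List.pyGetD_eq_getElem _ _ h0 (by simpa using hlt)]
  simp only [List.getElem_map, List.getElem_range]
  split_ifs with hc
  · rfl
  · have ht0 : t.toNat = 0 := by omega
    rcases hG with h1 | hG0
    · omega
    · rw [ht0, hG0]

lemma pvP_sub_le (nums : List Int) (f t : Nat) (hft : f ≤ t) :
    pvP nums t - pvP nums f ≤ (t : Int) - f := by
  induction t, hft using Nat.le_induction with
  | base => simp
  | succ t ht ih =>
      have := pvD_cases nums (t + 1)
      simp only [pvP]
      rcases this with h | h <;> rw [h] <;> push_cast <;> omega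

lemma pvS_le (nums : List Int) (t : Nat) : pvS nums t ≤ (t : Int) := by
  induction t with
  | zero => simp [pvS]
  | succ t ih => simp only [pvS]; split_ifs <;> push_cast <;> omega

lemma pvP_iff_pvS (nums : List Int) (f t : Nat) (hft : f ≤ t) :
    (pvP nums t - pvP nums f = (t : Int) - f) ↔ pvS nums t ≤ (f : Int) := by
  induction t, hft using Nat.le_induction with
  | base => simpa using pvS_le nums f
  | succ t ht ih =>
      have hle := pvP_sub_le nums f t ht
      rcases pvD_cases nums (t + 1) with h | h <;>
        simp only [pvP, pvS, h] <;> push_cast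
      · constructor
        · intro he; omega
        · intro hs; have := pvS_le nums t; omega
      · rw [← ih]; omega

theorem isArraySpecial_spec : Claim_equal_isArraySpecial := by
  intro nums queries _ hPre
  show isArraySpecial nums queries = isArraySpecial_alt nums queries
  by_cases hn : (nums.length : Int) < 2
  · simp only [isArraySpecial, isArraySpecial_alt]
    rw [if_pos hn, if_pos (show nums.length < 2 by omega)]
  · have hn' : ¬ nums.length < 2 := by omega
    rcases hPre with h | hq
    · exact absurd h hn
    simp only [isArraySpecial, isArraySpecial_alt]
    rw [if_neg hn, if_neg hn']
    have hpd := fill_loop_indep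
      (fun i => if PySem.Int.mod (PySem.List.pyGetD nums i 0) 2
                  ≠ PySem.Int.mod (PySem.List.pyGetD nums (i-1) 0) 2 then (1:Int) else 0)
      nums.length nums.length le_rfl
    rw [show (fun (j : Nat) => if 1 ≤ j ∧ j < nums.length then
          (if PySem.Int.mod (PySem.List.pyGetD nums (j : Int) 0) 2
             ≠ PySem.Int.mod (PySem.List.pyGetD nums ((j : Int)-1) 0) 2 then (1:Int) else 0) else 0)
        = (fun (j : Nat) => if 1 ≤ j ∧ j < nums.length then pvD nums j else 0) from rfl] at hpd
    rw [hpd]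
    have hread : ∀ k : Nat, k + 1 < nums.length →
        PySem.List.pyGetD ((List.range nums.length).map
          (fun j => if 1 ≤ j ∧ j < nums.length then pvD nums j else 0)) ((k : Int) + 1) 0
        = pvD nums (k + 1) := by
      intro k hk
      rw [show ((k : Int) + 1) = ((k + 1 : Nat) : Int) by push_cast; ring,
          pyGetD_filled (pvD nums) nums.length _ (by positivity) (by exact_mod_cast hk)
            (Or.inl (by exact_mod_cast Nat.succ_le_succ (Nat.zero_le k))),
          Int.toNat_natCast]
    have hps := fill_loop (pvP nums)
      (fun i prev => prev + PySem.List.pyGetD ((List.range nums.length).map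
          (fun j => if 1 ≤ j ∧ j < nums.length then pvD nums j else 0)) i 0)
      nums.length nums.length le_rfl rfl
      (by intro k hk; simp only [pvP]; rw [hread k hk])
    rw [hps]
    have hst := fill_loop (pvS nums)
      (fun i prev => if PySem.Int.mod (PySem.List.pyGetD nums i 0) 2
                       ≠ PySem.Int.mod (PySem.List.pyGetD nums (i-1) 0) 2 then prev else i)
      nums.length nums.length le_rfl rfl
      (by
        intro k hk
        simp only [pvS]
        by_cases hc : PySem.Int.mod (PySem.List.pyGetD nums ((k + 1 : Nat) : Int) 0) 2
            ≠ PySem.Int.mod (PySem.List.pyGetD nums (((k + 1 : Nat) : Int) - 1) 0) 2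
        · have hd1 : pvD nums (k + 1) = 1 := by unfold pvD; rw [if_pos hc]
          rw [hd1, if_pos rfl]
          rw [show ((k : Int) + 1) = ((k + 1 : Nat) : Int) by push_cast; ring, if_pos hc]
        · have hd0 : pvD nums (k + 1) = 0 := by unfold pvD; rw [if_neg hc]
          rw [hd0, if_neg (by norm_num)]
          rw [show ((k : Int) + 1) = ((k + 1 : Nat) : Int) by push_cast; ring, if_neg hc])
    rw [hst]
    rw [PySem.List.foldl_congr_mem queries _
      (fun result q => result ++ [(fun q => match q with
        | [] => true
        | [_] => true
        | fromi :: toi :: _ => decide (PySem.List.pyGetD ((List.range nums.length).map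
            (fun j => if 1 ≤ j ∧ j < nums.length then pvS nums j else 0)) toi 0 ≤ fromi)) q]) []
      (by
        intro acc q hqmem
        obtain ⟨hl, h0, hle, hlt⟩ := hq q hqmem
        rcases q with _ | ⟨f, q⟩
        · simp at hl
        rcases q with _ | ⟨t, q⟩
        · simp at hl
        rcases q with _ | ⟨x, q⟩
        swap
        · simp at hl
        simp at h0 hle hlt
        show (if f = t then acc ++ [true] else acc ++
            [decide (PySem.List.pyGetD ((List.range nums.length).map
                (fun j => if 1 ≤ j ∧ j < nums.length then pvP nums j else 0)) t 0
              - PySem.List.pyGetD ((List.range nums.length).map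
                (fun j => if 1 ≤ j ∧ j < nums.length then pvP nums j else 0)) f 0 = t - f)])
          = acc ++ [decide (PySem.List.pyGetD ((List.range nums.length).map
                (fun j => if 1 ≤ j ∧ j < nums.length then pvS nums j else 0)) t 0 ≤ f)]
        have h0t : (0 : Int) ≤ t := le_trans h0 hle
        have hPt := pyGetD_filled (pvP nums) nums.length t h0t hlt (Or.inr rfl)
        have hPf := pyGetD_filled (pvP nums) nums.length f h0 (lt_of_le_of_lt hle hlt) (Or.inr rfl)
        have hSt := pyGetD_filled (pvS nums) nums.length t h0t hlt (Or.inr rfl)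
        rw [hPt, hPf, hSt]
        have hcf : ((f.toNat : Nat) : Int) = f := Int.toNat_of_nonneg h0
        have hct : ((t.toNat : Nat) : Int) = t := Int.toNat_of_nonneg h0t
        by_cases hft : f = t
        · subst hft
          rw [if_pos rfl]
          have hle' : pvS nums f.toNat ≤ f := by
            have := pvS_le nums f.toNat; omega
          simp [hle']
        · rw [if_neg hft]
          have hiff := pvP_iff_pvS nums f.toNat t.toNat (by omega)
          rw [hcf, hct] at hiff
          rw [show (decide (pvP nums t.toNat - pvP nums f.toNat = t - f))
               = (decide (pvS nums t.toNat ≤ f)) from by rw [decide_eq_decide]; exact hiff])]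
    rw [PySem.List.foldl_append_singleton_eq_map, List.nil_append]
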